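-- pv_equiv track=rewrite | github.com/MX666-alt/FRLLM | app/main.py | get_path_parts
-- ===== SOURCE A (Python) =====
-- def get_path_parts(path):
--     """Split a path into parts for breadcrumb navigation"""
--     if not path:
--         return []
--
--     parts = []
--     current = ""
--
--     for part in path.strip("/").split("/"):
--         if current:
--             current = f"{current}/{part}"
--         else:
--             current = part
--
--         parts.append({
--             "name": part,
--             "path": f"/{current}"
--         })
--
--     return parts
-- ===== SOURCE B (Python) =====
-- def get_path_parts(path):
--     """Split a path into parts for breadcrumb navigation"""
--     if not path:
--         return []
--     segments = path.strip("/").split("/")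
--     return [{"name": seg, "path": "/" + "/".join(segments[:i + 1])}
--             for i, seg in enumerate(segments)]
-- ===== Notes on version B (the rewrite author's own statement) =====
-- stated objective: simpler
-- what changed: Replaces A's threaded `current` accumulator loop with a single pre-split of the path and a stateless per-index reconstruction: each breadcrumb path is the slash-join of the first i+1 segments, collected by one comprehension.
import Mathlib
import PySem

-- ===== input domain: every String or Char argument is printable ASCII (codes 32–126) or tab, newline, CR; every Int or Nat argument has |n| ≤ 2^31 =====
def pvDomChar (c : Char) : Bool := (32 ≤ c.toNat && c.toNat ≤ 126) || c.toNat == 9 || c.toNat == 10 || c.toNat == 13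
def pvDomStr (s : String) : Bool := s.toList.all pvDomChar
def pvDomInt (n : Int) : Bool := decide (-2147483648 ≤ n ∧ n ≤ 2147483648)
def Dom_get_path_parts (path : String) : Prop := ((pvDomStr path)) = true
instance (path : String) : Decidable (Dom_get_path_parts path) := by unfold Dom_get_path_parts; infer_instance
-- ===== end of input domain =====

-- B replaces A's threaded `current` accumulator with stateless per-index prefix joins
-- over one pre-split segment list (objective: simpler decomposition, not faster).

-- ===== PORT A =====
-- A's for-loop over the segments, threading the `current` string.
def pvLoopA (current : List Char) : List (List Char) → List (List (String × String))
  | [] => []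
  | p :: rest =>
    let cur' := if current ≠ [] then current ++ '/' :: p else p
    [("name", String.ofList p), ("path", String.ofList ('/' :: cur'))] :: pvLoopA cur' rest

def get_path_parts (path : String) : List (List (String × String)) :=
  if path = "" then []
  else
    pvLoopA [] (PySem.Chars.splitOn (PySem.Chars.stripChars path.toList ['/']) ['/'])

-- ===== PORT B =====
def get_path_parts_alt (path : String) : List (List (String × String)) :=
  if path = "" then []
  else
    let segs := PySem.Chars.splitOn (PySem.Chars.stripChars path.toList ['/']) ['/']
    (PySem.List.enumerate segs).map (fun p =>
      [("name", String.ofList p.2),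
       ("path", String.ofList ('/' :: PySem.Chars.join ['/'] (PySem.List.slice segs none (some (p.1 + 1)))))])

-- ===== PRECONDITION & SPEC =====
def Spec_get_path_parts (path : String) (out : List (List (String × String))) : Prop := out = get_path_parts_alt path
instance (path : String) (out : List (List (String × String))) : Decidable (Spec_get_path_parts path out) := by unfold Spec_get_path_parts; infer_instance

-- ===== CLAIM (what is proved, stated in full; the proofs are below) =====
def Claim_equal_get_path_parts : Prop := ∀ (path : String), Dom_get_path_parts path → Spec_get_path_parts path (get_path_parts path)

-- ===== LEMMAS AND PROOFS =====

-- splitOn.go prepends acc.reverse to what it produces from an empty accumulator.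
theorem pv_go_acc (sep : List Char) (fuel : Nat) (l cur : List Char) (acc : List (List Char)) :
    PySem.Chars.splitOn.go sep fuel l cur acc = acc.reverse ++ PySem.Chars.splitOn.go sep fuel l cur [] := by
  induction fuel generalizing l cur acc with
  | zero => simp [PySem.Chars.splitOn.go]
  | succ f ih =>
    cases l with
    | nil => simp [PySem.Chars.splitOn.go]
    | cons c rest =>
      simp only [PySem.Chars.splitOn.go]
      split_ifs with h
      · rw [ih _ _ (cur.reverse :: acc), ih _ _ [cur.reverse]]
        simp
      · exact ih _ _ acc

-- the first piece produced by splitOn.go starts with cur.reverse.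
theorem pv_go_head (sep : List Char) (fuel : Nat) (l cur : List Char) :
    ∃ r rest, PySem.Chars.splitOn.go sep fuel l cur [] = (cur.reverse ++ r) :: rest := by
  induction fuel generalizing l cur with
  | zero => exact ⟨l, [], by simp [PySem.Chars.splitOn.go]⟩
  | succ f ih =>
    cases l with
    | nil => exact ⟨[], [], by simp [PySem.Chars.splitOn.go]⟩
    | cons c rest =>
      simp only [PySem.Chars.splitOn.go]
      split_ifs with h
      · refine ⟨[], PySem.Chars.splitOn.go sep f (List.drop sep.length (c :: rest)) [] [], ?_⟩
        rw [pv_go_acc]; simp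
      · obtain ⟨r, rs, hr⟩ := ih rest (c :: cur)
        exact ⟨c :: r, rs, by rw [hr]; simp⟩

-- splitting a list whose head is not the separator: the first piece is nonempty.
theorem pv_splitOn_cons (c : Char) (t : List Char) (hc : c ≠ '/') :
    ∃ r rest, PySem.Chars.splitOn (c :: t) ['/'] = (c :: r) :: rest := by
  have hpre : (['/'].isPrefixOf (c :: t)) = false := by
    simp [List.isPrefixOf]
    exact fun h => (hc h.symm).elim
  unfold PySem.Chars.splitOn
  simp only [List.length_cons, Nat.add_succ]
  simp only [PySem.Chars.splitOn.go, hpre, Bool.false_eq_true, if_false]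
  obtain ⟨r, rs, hr⟩ := pv_go_head ['/'] (t.length + 1) t [c]
  exact ⟨r, rs, by rw [hr]; simp⟩

-- the segment list of a stripped path is either [[]] or begins with a nonempty segment.
theorem pv_segs_shape (s : List Char) :
    PySem.Chars.splitOn (PySem.Chars.stripChars s ['/']) ['/'] = [[]] ∨
    ∃ c r rest, PySem.Chars.splitOn (PySem.Chars.stripChars s ['/']) ['/'] = (c :: r) :: rest := by
  cases htt : PySem.Chars.stripChars s ['/'] with
  | nil => left; decide
  | cons c t' =>
    right
    -- the stripped string is a prefix of dropWhile, whose head does not satisfy the strip predicate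
    have hpref : c :: t' <+: List.dropWhile (fun d => (['/'] : List Char).contains d) s := by
      rw [← htt]
      show (List.dropWhile (fun d => (['/'] : List Char).contains d)
              (List.dropWhile (fun d => (['/'] : List Char).contains d) s).reverse).reverse <+:
           List.dropWhile (fun d => (['/'] : List Char).contains d) s
      have hsuf := List.dropWhile_suffix (l := (List.dropWhile (fun d => (['/'] : List Char).contains d) s).reverse)
        (fun d => (['/'] : List Char).contains d)
      have := hsuf.reverse
      simpa using this
    obtain ⟨u, hu⟩ := hpref
    have hc : (fun d => (['/'] : List Char).contains d) c = false := by
      have h1 : ∀ (w : List.dropWhile (fun d => (['/'] : List Char).contains d) s ≠ []),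
          (fun d => (['/'] : List Char).contains d) ((List.dropWhile (fun d => (['/'] : List Char).contains d) s).head w) = false :=
        fun w => List.head_dropWhile_not _ w
      rw [← hu] at h1
      simpa using h1 (by simp)
    have hc' : c ≠ '/' := by simpa using hc
    obtain ⟨r, rest, hr⟩ := pv_splitOn_cons c t' hc'
    exact ⟨c, r, rest, hr⟩

-- merging an accumulated prefix into a '/'-join.
theorem pv_join_merge (a b : List Char) (l : List (List Char)) :
    PySem.Chars.join ['/'] ((a ++ '/' :: b) :: l) = PySem.Chars.join ['/'] (a :: b :: l) := by
  cases l with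
  | nil => simp [PySem.Chars.join_singleton, PySem.Chars.join_cons_cons]
  | cons x xs => simp [PySem.Chars.join_cons_cons]

-- the common spec both ports are reduced to.
def pvSpecRow (segs : List (List Char)) (i : Nat) : List (String × String) :=
  [("name", String.ofList (segs.getD i [])),
   ("path", String.ofList ('/' :: PySem.Chars.join ['/'] (segs.take (i + 1))))]

-- A's loop with a nonempty accumulator cur computes the per-index joins prefixed by cur.
theorem pv_loopA_eq (segs : List (List Char)) (cur : List Char) (hcur : cur ≠ []) :
    pvLoopA cur segs = (List.range segs.length).map (fun i =>
      [("name", String.ofList (segs.getD i [])),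
       ("path", String.ofList ('/' :: PySem.Chars.join ['/'] (cur :: segs.take (i + 1))))]) := by
  induction segs generalizing cur with
  | nil => simp [pvLoopA]
  | cons p rest ih =>
    simp only [pvLoopA, if_pos hcur]
    rw [ih (cur ++ '/' :: p) (by simp)]
    rw [List.length_cons, List.range_succ_eq_map, List.map_cons, List.map_map]
    congr 1
    · simp [PySem.Chars.join_cons_cons, PySem.Chars.join_singleton, List.getD]
    · apply List.map_congr_left
      intro i _
      have h1 : (p :: rest).take (i + 1 + 1) = p :: rest.take (i + 1) := by simp
      simp only [Function.comp_apply, Nat.succ_eq_add_one, List.getD_cons_succ, h1]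
      rw [pv_join_merge]

-- B's map over enumerate computes the same per-index rows.
theorem pv_alt_eq (segs : List (List Char)) :
    ((PySem.List.enumerate segs).map (fun p =>
      [("name", String.ofList p.2),
       ("path", String.ofList ('/' :: PySem.Chars.join ['/'] (PySem.List.slice segs none (some (p.1 + 1)))))])) =
    (List.range segs.length).map (pvSpecRow segs) := by
  apply List.ext_getElem
  · simp [PySem.List.length_enumerate]
  · intro i h1 h2
    simp only [List.getElem_map, List.getElem_range]
    rw [PySem.List.getElem_enumerate]
    have hb : (0 : Int) + (i : Int) + 1 = ((i + 1 : Nat) : Int) := by push_cast; ring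
    rw [hb, PySem.List.slice_to _ (by positivity)]
    simp [pvSpecRow, List.getD, List.getElem?_eq_getElem (by simpa [PySem.List.length_enumerate] using h1)]

-- A's whole loop from the initial empty string equals the spec rows, given the segment shape.
theorem pv_loop_full (segs : List (List Char))
    (h : segs = [[]] ∨ ∃ c r rest, segs = (c :: r) :: rest) :
    pvLoopA [] segs = (List.range segs.length).map (pvSpecRow segs) := by
  rcases h with h | ⟨c, r, rest, h⟩
  · subst h; decide
  · subst h
    simp only [pvLoopA, ne_eq, not_true_eq_false, if_false]
    rw [pv_loopA_eq rest (c :: r) (by simp)]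
    rw [List.length_cons, List.range_succ_eq_map, List.map_cons, List.map_map]
    congr 1
    simp [pvSpecRow, PySem.Chars.join_singleton, List.getD]

-- ===== VERDICT (by name: the statement is the Claim_ definition above) =====
theorem get_path_parts_spec : Claim_equal_get_path_parts := by
  intro path _
  unfold Spec_get_path_parts get_path_parts get_path_parts_alt
  split_ifs with h
  · rfl
  · rw [pv_alt_eq, pv_loop_full _ (pv_segs_shape path.toList)]
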